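-- pv_equiv track=rewrite | github.com/bubblebee1408/Placeon.- | tests/judge_tests.py | build_failure_insights
-- ===== SOURCE A (Python) =====
-- def build_failure_insights(reasons: list[str]) -> list[str]:
--     insights: list[str] = []
--     for reason in reasons:
--         if "score_out_of_range" in reason:
--             insights.append("Model scoring is not aligned with expected calibration boundaries.")
--         if "over_scoring_shallow" in reason:
--             insights.append("Model is over-scoring shallow answers.")
--         if "high_confidence_weak" in reason:
--             insights.append("Model confidence too high for weak answer.")
--         if "low_confidence_strong" in reason:
--             insights.append("Model not confident enough on strong evidence.")
--         if "depth_not_rewarded" in reason: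
--             insights.append("Model not rewarding depth and concrete mechanisms.")
--     return sorted(set(insights))
-- ===== SOURCE B (Python) =====
-- # Rules pre-sorted by message text; output each message at most once, in order,
-- # iff some reason triggers it -- no accumulator list, no set, no sort call.
-- SORTED_RULES = [
--     ("high_confidence_weak", "Model confidence too high for weak answer."),
--     ("over_scoring_shallow", "Model is over-scoring shallow answers."),
--     ("low_confidence_strong", "Model not confident enough on strong evidence."),
--     ("depth_not_rewarded", "Model not rewarding depth and concrete mechanisms."),
--     ("score_out_of_range", "Model scoring is not aligned with expected calibration boundaries."),
-- ]
--
--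
-- def build_failure_insights(reasons: list[str]) -> list[str]:
--     return [msg for sub, msg in SORTED_RULES
--             if any(sub in reason for reason in reasons)]
-- ===== Notes on version B (the rewrite author's own statement) =====
-- stated objective: alternative
-- what changed: Inverts the traversal: instead of scanning each reason through five ifs, collecting duplicate messages and then dedup+sorting, B iterates once over a rule table pre-sorted by message and emits each message at most once iff any reason contains its substring, so no accumulator, no set and no sort call are needed.
import Mathlib
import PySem

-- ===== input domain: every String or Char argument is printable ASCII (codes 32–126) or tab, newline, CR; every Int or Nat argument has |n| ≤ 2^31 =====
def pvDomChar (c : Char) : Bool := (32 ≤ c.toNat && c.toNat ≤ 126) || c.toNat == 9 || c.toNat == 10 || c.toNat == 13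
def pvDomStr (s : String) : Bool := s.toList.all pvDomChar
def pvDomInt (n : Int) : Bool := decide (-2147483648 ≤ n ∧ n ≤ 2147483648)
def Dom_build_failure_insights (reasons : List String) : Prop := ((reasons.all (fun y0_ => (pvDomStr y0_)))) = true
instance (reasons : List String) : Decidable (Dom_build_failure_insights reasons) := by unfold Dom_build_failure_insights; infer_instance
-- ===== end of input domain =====

-- B inverts the traversal: one pass over a rule table pre-sorted by message, emitting each
-- message at most once iff any reason contains its substring — no set, no sort (alternative).

-- ===== PORT A =====
-- literal transliteration: the for-loop with its five independent ifs appending to `insights`,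
-- then `sorted(set(insights))`.
def build_failure_insights (reasons : List String) : List String :=
  let insights : List String :=
    reasons.foldl (fun insights reason =>
      let insights := if PySem.Str.isIn "score_out_of_range" reason then
        insights ++ ["Model scoring is not aligned with expected calibration boundaries."] else insights
      let insights := if PySem.Str.isIn "over_scoring_shallow" reason then
        insights ++ ["Model is over-scoring shallow answers."] else insights
      let insights := if PySem.Str.isIn "high_confidence_weak" reason then
        insights ++ ["Model confidence too high for weak answer."] else insights
      let insights := if PySem.Str.isIn "low_confidence_strong" reason then
        insights ++ ["Model not confident enough on strong evidence."] else insights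
      let insights := if PySem.Str.isIn "depth_not_rewarded" reason then
        insights ++ ["Model not rewarding depth and concrete mechanisms."] else insights
      insights) []
  PySem.List.sorted (PySem.Set.ofList insights) (fun x => x) false

-- ===== PORT B =====
-- the SORTED_RULES table, pre-sorted by message text
def pvSortedRules : List (String × String) :=
  [("high_confidence_weak", "Model confidence too high for weak answer."),
   ("over_scoring_shallow", "Model is over-scoring shallow answers."),
   ("low_confidence_strong", "Model not confident enough on strong evidence."),
   ("depth_not_rewarded", "Model not rewarding depth and concrete mechanisms."),
   ("score_out_of_range", "Model scoring is not aligned with expected calibration boundaries.")]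

-- [msg for sub, msg in SORTED_RULES if any(sub in reason for reason in reasons)]
def build_failure_insights_alt (reasons : List String) : List String :=
  (pvSortedRules.filter (fun r =>
    reasons.any (fun reason => PySem.Str.isIn r.1 reason))).map (fun r => r.2)

-- ===== PRECONDITION & SPEC =====
def Spec_build_failure_insights (reasons : List String) (out : List String) : Prop := out = build_failure_insights_alt reasons
instance (reasons : List String) (out : List String) : Decidable (Spec_build_failure_insights reasons out) := by unfold Spec_build_failure_insights; infer_instance

-- ===== CLAIM (what is proved, stated in full; the proofs are below) =====
def Claim_equal_build_failure_insights : Prop := ∀ (reasons : List String), Dom_build_failure_insights reasons → Spec_build_failure_insights reasons (build_failure_insights reasons)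

-- ===== LEMMAS AND PROOFS =====

-- A's rule table in A's branch order (proof-side rewriting target for the fold)
def pvRulesA : List (String × String) :=
  [("score_out_of_range", "Model scoring is not aligned with expected calibration boundaries."),
   ("over_scoring_shallow", "Model is over-scoring shallow answers."),
   ("high_confidence_weak", "Model confidence too high for weak answer."),
   ("low_confidence_strong", "Model not confident enough on strong evidence."),
   ("depth_not_rewarded", "Model not rewarding depth and concrete mechanisms.")]

-- per-reason: A's five-if chain appends exactly the messages of the matching rules
theorem pv_step_eq (acc : List String) (reason : String) :
    (let i1 := if PySem.Str.isIn "score_out_of_range" reason then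
        acc ++ ["Model scoring is not aligned with expected calibration boundaries."] else acc
     let i2 := if PySem.Str.isIn "over_scoring_shallow" reason then
        i1 ++ ["Model is over-scoring shallow answers."] else i1
     let i3 := if PySem.Str.isIn "high_confidence_weak" reason then
        i2 ++ ["Model confidence too high for weak answer."] else i2
     let i4 := if PySem.Str.isIn "low_confidence_strong" reason then
        i3 ++ ["Model not confident enough on strong evidence."] else i3
     if PySem.Str.isIn "depth_not_rewarded" reason then
        i4 ++ ["Model not rewarding depth and concrete mechanisms."] else i4)
    = acc ++ (pvRulesA.filter (fun r => PySem.Str.isIn r.1 reason)).map (fun r => r.2) := by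
  simp only [pvRulesA, List.filter_cons, List.filter_nil]
  split_ifs <;> simp

-- A's accumulated list equals the flatMap over the rule table
theorem pv_fold_eq (reasons : List String) (acc : List String) :
    reasons.foldl (fun insights reason =>
      let insights := if PySem.Str.isIn "score_out_of_range" reason then
        insights ++ ["Model scoring is not aligned with expected calibration boundaries."] else insights
      let insights := if PySem.Str.isIn "over_scoring_shallow" reason then
        insights ++ ["Model is over-scoring shallow answers."] else insights
      let insights := if PySem.Str.isIn "high_confidence_weak" reason then
        insights ++ ["Model confidence too high for weak answer."] else insights
      let insights := if PySem.Str.isIn "low_confidence_strong" reason then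
        insights ++ ["Model not confident enough on strong evidence."] else insights
      let insights := if PySem.Str.isIn "depth_not_rewarded" reason then
        insights ++ ["Model not rewarding depth and concrete mechanisms."] else insights
      insights) acc
    = acc ++ reasons.flatMap (fun reason =>
        (pvRulesA.filter (fun r => PySem.Str.isIn r.1 reason)).map (fun r => r.2)) := by
  induction reasons generalizing acc with
  | nil => simp
  | cons r rs ih =>
    simp only [List.foldl_cons, List.flatMap_cons]
    rw [ih, pv_step_eq, List.append_assoc]

-- B's output is strictly increasing (a filter of the strictly sorted message column)
theorem pv_alt_pairwise (reasons : List String) :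
    (build_failure_insights_alt reasons).Pairwise (· < ·) := by
  unfold build_failure_insights_alt
  have h : pvSortedRules.Pairwise (fun a b => a.2 < b.2) := by
    simp [pvSortedRules]; decide
  exact (List.Pairwise.map _ (fun _ _ h => h) (h.filter _))

-- same elements: B's output and A's deduped accumulator contain the same messages
theorem pv_mem_iff (reasons : List String) (x : String) :
    x ∈ build_failure_insights_alt reasons ↔
      x ∈ PySem.Set.ofList (reasons.flatMap (fun reason =>
        (pvRulesA.filter (fun r => PySem.Str.isIn r.1 reason)).map (fun r => r.2))) := by
  rw [PySem.Set.mem_ofList]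
  unfold build_failure_insights_alt
  simp only [List.mem_map, List.mem_filter, List.mem_flatMap, List.any_eq_true,
    pvSortedRules, pvRulesA, List.mem_cons, List.not_mem_nil, or_false]
  constructor
  · rintro ⟨r, ⟨hr, reason, hreason, hin⟩, hx⟩
    exact ⟨reason, hreason, r, ⟨by tauto, hin⟩, hx⟩
  · rintro ⟨reason, hreason, r, ⟨hr, hin⟩, hx⟩
    exact ⟨r, ⟨by tauto, reason, hreason, hin⟩, hx⟩

-- ===== VERDICT (by name: the statement is the Claim_ definition above) =====
theorem build_failure_insights_spec : Claim_equal_build_failure_insights := by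
  intro reasons _
  unfold Spec_build_failure_insights
  unfold build_failure_insights
  rw [pv_fold_eq, List.nil_append]
  set l := reasons.flatMap (fun reason =>
    (pvRulesA.filter (fun r => PySem.Str.isIn r.1 reason)).map (fun r => r.2)) with hl
  have hp : (build_failure_insights_alt reasons).Perm (PySem.Set.ofList l) := by
    apply (List.perm_ext_iff_of_nodup ?_ (PySem.Set.nodup_ofList l)).mpr
    · intro x; exact pv_mem_iff reasons x
    · exact ((pv_alt_pairwise reasons).imp (fun h => ne_of_lt h))
  exact PySem.List.sorted_eq_of_perm_of_pairwise_lt _ _ (fun x => x) hp (pv_alt_pairwise reasons)
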